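-- pv_equiv track=rewrite | github.com/cavanaughdesign/Wordpress-Engineer | web/wordpress_ai_integration.py | _extract_code_recommendations
-- ===== SOURCE A (Python) =====
-- from typing import Dict, Any, Optional, List
--
-- def _extract_code_recommendations(ai_response: str) -> List[Dict[str, str]]:
--     """Extract code recommendations from AI response."""
--     recommendations = []
--     lines = ai_response.split('\n')
--
--     current_rec = {}
--     for line in lines:
--         line = line.strip()
--         if line.startswith('##') or line.startswith('###'):
--             if current_rec:
--                 recommendations.append(current_rec)
--                 current_rec = {}
--             current_rec['title'] = line.replace('#', '').strip()
--         elif line and current_rec and 'title' in current_rec: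
--             if 'description' not in current_rec:
--                 current_rec['description'] = line
--             else:
--                 current_rec['description'] += ' ' + line
--
--     if current_rec:
--         recommendations.append(current_rec)
--
--     return recommendations[:5]  # Limit to top 5 recommendations
-- ===== SOURCE B (Python) =====
-- from typing import Dict, List
--
-- def _split_at_header(lines):
--     """Split lines into (chunk before the first '##' header, remainder starting at it)."""
--     for i, l in enumerate(lines):
--         if l.startswith('##'):
--             return lines[:i], lines[i:]
--     return lines, []
--
-- def _sections(lines):
--     """lines is empty or starts with a header: peel one section off, recurse on the rest."""
--     if not lines:
--         return []
--     body_lines, rest = _split_at_header(lines[1:])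
--     rec = {'title': lines[0].replace('#', '').strip()}
--     body = [l for l in body_lines if l]
--     if body:
--         rec['description'] = ' '.join(body)
--     return [rec] + _sections(rest)
--
-- def _extract_code_recommendations(ai_response: str) -> List[Dict[str, str]]:
--     """Extract code recommendations: recursive-descent segmentation at '##' headers."""
--     lines = [l.strip() for l in ai_response.split('\n')]
--     _, start = _split_at_header(lines)
--     return _sections(start)[:5]
-- ===== Notes on version B (the rewrite author's own statement) =====
-- stated objective: alternative
-- what changed: Replaces A's single-pass loop that mutates a current-record dict (growing 'description' in place) with recursive-descent segmentation: strip all lines, split off the prologue before the first '##' header, then a recursive function peels one (header, body-chunk) section at a time using a split-at-next-header helper and renders each dict from its chunk.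
import Mathlib
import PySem

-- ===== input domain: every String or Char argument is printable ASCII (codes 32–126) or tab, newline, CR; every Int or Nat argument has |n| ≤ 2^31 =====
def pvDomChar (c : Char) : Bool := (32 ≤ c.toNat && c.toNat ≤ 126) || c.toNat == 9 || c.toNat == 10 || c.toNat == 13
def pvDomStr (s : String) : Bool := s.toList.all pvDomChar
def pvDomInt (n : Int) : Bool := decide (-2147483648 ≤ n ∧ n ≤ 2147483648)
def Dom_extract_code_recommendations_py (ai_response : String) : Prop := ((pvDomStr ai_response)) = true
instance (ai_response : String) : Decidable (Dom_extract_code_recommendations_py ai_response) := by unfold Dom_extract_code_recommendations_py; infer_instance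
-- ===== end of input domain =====

-- B replaces A's single-pass loop mutating a current-record dict by recursive-descent segmentation:
-- split at '##' headers, peel one section per recursive call (alternative decomposition, same cost).

-- ===== PORT A =====
-- one iteration of A's for-loop over the state (recommendations, current_rec)
def pvStepA (st : List (PySem.Dict String String) × PySem.Dict String String) (line0 : String) :
    List (PySem.Dict String String) × PySem.Dict String String :=
  let line := PySem.Str.strip line0
  if PySem.Str.startswith line "##" || PySem.Str.startswith line "###" then
    let st' := if st.2.items ≠ [] then (st.1 ++ [st.2], PySem.Dict.empty) else st
    (st'.1, st'.2.insert "title" (PySem.Str.strip (PySem.Str.replace line "#" "")))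
  else if PySem.Str.strip line0 ≠ "" ∧ st.2.items ≠ [] ∧ st.2.contains "title" = true then
    if st.2.contains "description" = false then
      (st.1, st.2.insert "description" (PySem.Str.strip line0))
    else
      -- current_rec['description'] += ' ' + line  (the key is present in this branch, so getD's default is never used)
      (st.1, st.2.insert "description" ((st.2.get? "description").getD "" ++ " " ++ PySem.Str.strip line0))
  else st

def extract_code_recommendations_py (ai_response : String) : List (List (String × String)) :=
  -- '\n' is a non-empty separator, so split? is always `some`
  let lines := (PySem.Str.split? ai_response "\n").getD []
  let st := lines.foldl pvStepA ([], PySem.Dict.empty)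
  let recs := if st.2.items ≠ [] then st.1 ++ [st.2] else st.1
  (PySem.List.slice recs none (some 5)).map (fun d => d.items)

-- ===== PORT B =====
-- _split_at_header: lines before the first '##' header, and the remainder from that header on
def pvSplitAtHeader : List String → List String × List String
  | [] => ([], [])
  | l :: ls =>
    if PySem.Str.startswith l "##" then ([], l :: ls)
    else
      let p := pvSplitAtHeader ls
      (l :: p.1, p.2)

-- termination measure for pvSections (cited by its decreasing_by)
lemma pvSplitAtHeader_snd_len (ls : List String) : (pvSplitAtHeader ls).2.length ≤ ls.length := by
  induction ls with
  | nil => simp [pvSplitAtHeader]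
  | cons l ls ih =>
    simp only [pvSplitAtHeader]
    split
    · simp
    · simpa using Nat.le_succ_of_le ih

-- _sections: peel one (header, body-chunk) section off, recurse on the remainder
def pvSections : List String → List (List (String × String))
  | [] => []
  | l :: ls =>
    let p := pvSplitAtHeader ls
    let body := p.1.filter (fun x => x ≠ "")
    (("title", PySem.Str.strip (PySem.Str.replace l "#" "")) ::
      (if body.isEmpty then [] else [("description", PySem.Str.join " " body)])) ::
    pvSections p.2
termination_by ls => ls.length
decreasing_by
  simp only [List.length_cons]
  exact Nat.lt_succ_of_le (pvSplitAtHeader_snd_len ls)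

def extract_code_recommendations_py_alt (ai_response : String) : List (List (String × String)) :=
  let lines := ((PySem.Str.split? ai_response "\n").getD []).map PySem.Str.strip
  let start := (pvSplitAtHeader lines).2
  PySem.List.slice (pvSections start) none (some 5)

-- ===== PRECONDITION & SPEC =====
def Spec_extract_code_recommendations_py (ai_response : String) (out : List (List (String × String))) : Prop := out = extract_code_recommendations_py_alt ai_response
instance (ai_response : String) (out : List (List (String × String))) : Decidable (Spec_extract_code_recommendations_py ai_response out) := by unfold Spec_extract_code_recommendations_py; infer_instance

-- ===== CLAIM (what is proved, stated in full; the proofs are below) =====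
def Claim_equal_extract_code_recommendations_py : Prop := ∀ (ai_response : String), Dom_extract_code_recommendations_py ai_response → Spec_extract_code_recommendations_py ai_response (extract_code_recommendations_py ai_response)

-- ===== LEMMAS AND PROOFS =====

-- proof-side view of A's loop as a list of (title, body-lines) sections
def pvStepB (secs : List (String × List String)) (raw : String) : List (String × List String) :=
  let line := PySem.Str.strip raw
  if PySem.Str.startswith line "##" then
    secs ++ [(PySem.Str.strip (PySem.Str.replace line "#" ""), [])]
  else if line ≠ "" then
    match secs.getLast? with
    | none => secs
    | some (t, body) => secs.dropLast ++ [(t, body ++ [line])]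
  else secs

-- pvStepB on an already-stripped line
def pvStepB' (secs : List (String × List String)) (line : String) : List (String × List String) :=
  if PySem.Str.startswith line "##" then
    secs ++ [(PySem.Str.strip (PySem.Str.replace line "#" ""), [])]
  else if line ≠ "" then
    match secs.getLast? with
    | none => secs
    | some (t, body) => secs.dropLast ++ [(t, body ++ [line])]
  else secs

-- one section becomes one record
def pvRenderSec (s : String × List String) : List (String × String) :=
  ("title", s.1) :: (if s.2.isEmpty then [] else [("description", PySem.Str.join " " s.2)])

-- the dict A carries while the current section is (t, body)
def pvDictOf (t : String) (body : List String) : PySem.Dict String String :=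
  PySem.Dict.mk (("title", t) :: (if body.isEmpty then [] else [("description", PySem.Str.join " " body)]))

-- loop invariant tying A's state to the section list
def pvRel (st : List (PySem.Dict String String) × PySem.Dict String String)
    (secs : List (String × List String)) : Prop :=
  (secs = [] ∧ st = ([], PySem.Dict.empty)) ∨
  (∃ ss t body, secs = ss ++ [(t, body)] ∧
    st.1 = ss.map (fun s => pvDictOf s.1 s.2) ∧ st.2 = pvDictOf t body)

-- startswith('###') implies startswith('##'), so A's disjunction collapses to a single test
lemma pv_sw3 (line : String) :
    (PySem.Str.startswith line "##" || PySem.Str.startswith line "###") =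
      PySem.Str.startswith line "##" := by
  cases h : PySem.Str.startswith line "##"
  · simp only [Bool.false_or]
    rw [Bool.eq_false_iff]
    intro h3
    simp only [PySem.Str.startswith_eq] at h h3
    rw [PySem.Chars.startswith_iff] at h3
    rw [Bool.eq_false_iff] at h
    exact h (by rw [PySem.Chars.startswith_iff]; exact List.IsPrefix.trans ⟨['#'], rfl⟩ h3)
  · simp

lemma pv_chars_join_snoc (sep : List Char) (b : List (List Char)) (x : List Char) (h : b ≠ []) :
    PySem.Chars.join sep (b ++ [x]) = PySem.Chars.join sep b ++ sep ++ x := by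
  induction b with
  | nil => exact absurd rfl h
  | cons a bs ih =>
    cases bs with
    | nil => simp [PySem.Chars.join_cons_cons, PySem.Chars.join_singleton]
    | cons c cs =>
      simp only [List.cons_append, PySem.Chars.join_cons_cons]
      rw [← List.cons_append, ih (by simp)]
      simp [List.append_assoc]

lemma pv_join_singleton (x : String) : PySem.Str.join " " [x] = x := by
  apply String.ext
  rw [PySem.Str.toList_join]
  simp [PySem.Chars.join_singleton]

lemma pv_join_snoc (b : List String) (x : String) (h : b ≠ []) :
    PySem.Str.join " " (b ++ [x]) = PySem.Str.join " " b ++ " " ++ x := by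
  apply String.ext
  simp only [PySem.Str.toList_join, List.map_append, List.map_cons, List.map_nil,
    String.toList_append]
  rw [pv_chars_join_snoc _ _ _ (by simpa using h)]

lemma pv_step (st : List (PySem.Dict String String) × PySem.Dict String String)
    (secs : List (String × List String)) (raw : String) (h : pvRel st secs) :
    pvRel (pvStepA st raw) (pvStepB secs raw) := by
  obtain ⟨r, c⟩ := st
  simp only [pvStepA, pvStepB]
  rw [pv_sw3]
  by_cases hsw : PySem.Str.startswith (PySem.Str.strip raw) "##" = true
  · -- header line: close the current section (if any), open a new one
    rw [if_pos hsw, if_pos hsw]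
    rcases h with ⟨hs, hst⟩ | ⟨ss, t, body, hs, h1, h2⟩
    · obtain ⟨h1, h2⟩ := Prod.mk.injEq .. ▸ hst
      subst hs; subst h1; subst h2
      rw [if_neg (by simp [PySem.Dict.empty])]
      exact Or.inr ⟨[], _, [], rfl, rfl, rfl⟩
    · simp only at h1 h2; subst hs h1 h2
      rw [if_pos (by simp [pvDictOf])]
      refine Or.inr ⟨ss ++ [(t, body)], _, [], rfl, by simp [pvDictOf], rfl⟩
  · rw [if_neg hsw, if_neg hsw]
    rcases h with ⟨hs, hst⟩ | ⟨ss, t, body, hs, h1, h2⟩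
    · -- before the first header both sides ignore the line
      obtain ⟨h1, h2⟩ := Prod.mk.injEq .. ▸ hst
      subst hs; subst h1; subst h2
      rw [if_neg (by simp [PySem.Dict.empty])]
      rw [show ([] : List (String × List String)).getLast? = none from rfl]
      split <;> exact Or.inl ⟨rfl, rfl⟩
    · simp only at h1 h2; subst hs h1 h2
      by_cases hl : PySem.Str.strip raw = ""
      · -- blank line: both sides keep their state
        rw [if_neg (by simp [hl]), if_neg (by simp [hl])]
        exact Or.inr ⟨ss, t, body, rfl, rfl, rfl⟩
      · -- body line: A extends current_rec['description'], the view appends to the body list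
        rw [if_pos hl, List.getLast?_concat, List.dropLast_concat,
          if_pos ⟨hl, by simp [pvDictOf], by simp [pvDictOf, PySem.Dict.contains]⟩]
        by_cases hb : body = []
        · subst hb
          rw [if_pos (show (pvDictOf t []).contains "description" = false from rfl)]
          refine Or.inr ⟨ss, t, [PySem.Str.strip raw], rfl, rfl, ?_⟩
          show (pvDictOf t []).insert "description" (PySem.Str.strip raw) = _
          rw [show pvDictOf t [PySem.Str.strip raw] =
            PySem.Dict.mk [("title", t), ("description", PySem.Str.strip raw)] by
              simp [pvDictOf, pv_join_singleton]]
          rfl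
        · have hbe : body.isEmpty = false := by simpa using hb
          rw [if_neg (show ¬ (pvDictOf t body).contains "description" = false by
            simp [pvDictOf, hbe, PySem.Dict.contains])]
          refine Or.inr ⟨ss, t, body ++ [PySem.Str.strip raw], rfl, rfl, ?_⟩
          show (pvDictOf t body).insert "description" _ = _
          rw [show pvDictOf t body =
            PySem.Dict.mk [("title", t), ("description", PySem.Str.join " " body)] by
              simp [pvDictOf, hbe]]
          rw [show pvDictOf t (body ++ [PySem.Str.strip raw]) =
            PySem.Dict.mk [("title", t),
              ("description", PySem.Str.join " " body ++ " " ++ PySem.Str.strip raw)] by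
              unfold pvDictOf
              rw [show (body ++ [PySem.Str.strip raw]).isEmpty = false from by simp,
                if_neg (by simp), pv_join_snoc _ _ hb]]
          rfl

lemma pv_fold (lines : List String) (st : List (PySem.Dict String String) × PySem.Dict String String)
    (secs : List (String × List String)) (h : pvRel st secs) :
    pvRel (lines.foldl pvStepA st) (lines.foldl pvStepB secs) := by
  induction lines generalizing st secs with
  | nil => exact h
  | cons l ls ih =>
    rw [List.foldl_cons, List.foldl_cons]
    exact ih _ _ (pv_step _ _ _ h)

lemma pv_final (st : List (PySem.Dict String String) × PySem.Dict String String)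
    (secs : List (String × List String)) (h : pvRel st secs) :
    (PySem.List.slice (if st.2.items ≠ [] then st.1 ++ [st.2] else st.1) none (some 5)).map
        (fun d => d.items) =
      PySem.List.slice (secs.map pvRenderSec) none (some 5) := by
  have hsl : ∀ (xs : List (List (String × String))), PySem.List.slice xs none (some 5) = xs.take 5 :=
    fun xs => PySem.List.slice_to xs (by norm_num)
  have hsl' : ∀ (xs : List (PySem.Dict String String)),
      PySem.List.slice xs none (some 5) = xs.take 5 :=
    fun xs => PySem.List.slice_to xs (by norm_num)
  rcases h with ⟨hs, hst⟩ | ⟨ss, t, body, hs, h1, h2⟩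
  · subst hs; rw [hst]
    simp [PySem.Dict.empty, hsl, hsl']
  · subst hs
    rw [h2, h1, if_pos (by simp [pvDictOf]), hsl, hsl',
      show (List.map (fun s : String × List String => pvDictOf s.1 s.2) ss ++ [pvDictOf t body]) =
        (ss ++ [(t, body)]).map (fun s => pvDictOf s.1 s.2) from by simp,
      ← List.map_take, ← List.map_take, List.map_map]
    rfl

-- ===== relating the section fold to B's recursive descent =====

lemma pvSections_nil : pvSections [] = [] := by rw [pvSections]

lemma pvSections_cons (l : String) (ls : List String) :
    pvSections (l :: ls) =
      pvRenderSec (PySem.Str.strip (PySem.Str.replace l "#" ""),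
        (pvSplitAtHeader ls).1.filter (fun x => x ≠ "")) ::
      pvSections (pvSplitAtHeader ls).2 := by
  conv_lhs => rw [pvSections]
  rfl

lemma pv_split_header (l : String) (ls : List String) (hh : PySem.Str.startswith l "##" = true) :
    pvSplitAtHeader (l :: ls) = ([], l :: ls) := by
  simp only [pvSplitAtHeader, if_pos hh]

lemma pv_split_nonheader (l : String) (ls : List String)
    (hh : ¬ PySem.Str.startswith l "##" = true) :
    pvSplitAtHeader (l :: ls) = (l :: (pvSplitAtHeader ls).1, (pvSplitAtHeader ls).2) := by
  simp only [pvSplitAtHeader, if_neg hh]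

lemma pvStepB'_ne_nil (cur : List (String × List String)) (l : String) (h : cur ≠ []) :
    pvStepB' cur l ≠ [] := by
  unfold pvStepB'
  split
  · simp
  · split
    · match hc : cur.getLast? with
      | none => exact h
      | some (t, body) => simp
    · exact h

lemma pv_stepB'_append (ss cur : List (String × List String)) (h : cur ≠ []) (l : String) :
    pvStepB' (ss ++ cur) l = ss ++ pvStepB' cur l := by
  unfold pvStepB'
  split
  · simp
  · split
    · match hc : cur.getLast? with
      | none => exact absurd (List.getLast?_eq_none_iff.mp hc) h
      | some (t, body) =>
        simp [List.getLast?_append, hc, List.dropLast_append_of_ne_nil h, List.append_assoc]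
    · rfl

lemma pv_foldB'_append (ls : List String) (ss cur : List (String × List String)) (h : cur ≠ []) :
    ls.foldl pvStepB' (ss ++ cur) = ss ++ ls.foldl pvStepB' cur := by
  induction ls generalizing cur with
  | nil => rfl
  | cons l ls ih =>
    rw [List.foldl_cons, List.foldl_cons, pv_stepB'_append ss cur h l,
      ih _ (pvStepB'_ne_nil cur l h)]

-- main bridge, open-section form: the fold from one open section, rendered, is one peeled section
lemma pvM1 (ls : List String) (t : String) (b : List String) :
    ((ls.foldl pvStepB' [(t, b)]).map pvRenderSec) =
      pvRenderSec (t, b ++ (pvSplitAtHeader ls).1.filter (fun x => x ≠ "")) ::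
        pvSections (pvSplitAtHeader ls).2 := by
  induction ls generalizing t b with
  | nil => simp [pvSplitAtHeader, pvSections_nil]
  | cons l ls ih =>
    by_cases hh : PySem.Str.startswith l "##" = true
    · rw [List.foldl_cons,
        show pvStepB' [(t, b)] l =
          [(t, b)] ++ [(PySem.Str.strip (PySem.Str.replace l "#" ""), [])] from by
            unfold pvStepB'; rw [if_pos hh],
        pv_foldB'_append _ _ _ (by simp), List.map_append, ih, pv_split_header _ _ hh]
      simp [pvSections_cons]
    · by_cases hl : l = ""
      · subst hl
        rw [List.foldl_cons, show pvStepB' [(t, b)] "" = [(t, b)] from rfl, ih,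
          pv_split_nonheader _ _ hh]
        simp
      · rw [List.foldl_cons,
          show pvStepB' [(t, b)] l = [(t, b ++ [l])] from by
            unfold pvStepB'; rw [if_neg hh, if_pos hl]; rfl,
          ih, pv_split_nonheader _ _ hh]
        simp [hl]

-- main bridge: the whole fold, rendered, is B's recursive descent from the first header
lemma pvM0 (ls : List String) :
    ((ls.foldl pvStepB' []).map pvRenderSec) = pvSections (pvSplitAtHeader ls).2 := by
  induction ls with
  | nil => simp [pvSplitAtHeader, pvSections_nil]
  | cons l ls ih =>
    by_cases hh : PySem.Str.startswith l "##" = true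
    · rw [List.foldl_cons,
        show pvStepB' [] l = [(PySem.Str.strip (PySem.Str.replace l "#" ""), [])] from by
          unfold pvStepB'; rw [if_pos hh]; rfl,
        pvM1, pv_split_header _ _ hh]
      simp [pvSections_cons]
    · rw [List.foldl_cons,
        show pvStepB' [] l = [] from by
          unfold pvStepB'; rw [if_neg hh]; split <;> rfl,
        ih, pv_split_nonheader _ _ hh]

-- A's fold over raw lines is the stripped-line fold
lemma pv_fold_strip (raws : List String) :
    raws.foldl pvStepB [] = (raws.map PySem.Str.strip).foldl pvStepB' [] := by
  have hf : pvStepB = fun s r => pvStepB' s (PySem.Str.strip r) := rfl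
  rw [hf, List.foldl_map]

-- ===== VERDICT (by name: the statement is the Claim_ definition above) =====
theorem extract_code_recommendations_py_spec : Claim_equal_extract_code_recommendations_py := by
  intro ai_response _
  show extract_code_recommendations_py ai_response = extract_code_recommendations_py_alt ai_response
  simp only [extract_code_recommendations_py, extract_code_recommendations_py_alt]
  rw [pv_final _ _ (pv_fold _ _ _ (Or.inl ⟨rfl, rfl⟩)), pv_fold_strip, pvM0]
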